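-- pv_equiv track=rewrite | github.com/wwwskokru-cell/Pyton_project | TASKS/Task-1.py | counting_pairs_set_card
-- ===== SOURCE A (Python) =====
-- from collections import Counter
--
-- def counting_pairs_set_card (entering_numbers_int ):
--     #Определение пара, сет, каре
--     answer = {
--         "Пары" : 0,
--         "Сет" : 0,
--         "Каре" : 0
--     }
--     num_dict = Counter(entering_numbers_int)
--     for i in num_dict:
--         if num_dict[i] == 2:
--             answer["Пары"] += 1
--         elif num_dict[i] == 3:
--             answer["Сет"] += 1
--         elif num_dict[i] == 4:
--             answer["Каре"] += 1
--     return answer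
-- ===== SOURCE B (Python) =====
-- def counting_pairs_set_card(entering_numbers_int):
--     # Sort, then a single run-length scan: equal numbers are adjacent after
--     # sorting, so each run of length 2/3/4 is one pair/set/quad.
--     p = s = q = 0
--     run = 0
--     prev = None
--     for y in sorted(entering_numbers_int):
--         if run > 0 and prev == y:
--             run += 1
--         else:
--             p += run == 2
--             s += run == 3
--             q += run == 4
--             run = 1
--         prev = y
--     p += run == 2
--     s += run == 3
--     q += run == 4
--     return {"Пары": p, "Сет": s, "Каре": q}
-- ===== Notes on version B (the rewrite author's own statement) =====
-- stated objective: alternative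
-- what changed: Replaces hash counting (Counter plus a scan of its entries with an if/elif chain) by sort-then-run-length-scan: sort the list and tally runs of length 2/3/4 in one pass with a (prev, run) accumulator; no Counter or dict is built.
import Mathlib
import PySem

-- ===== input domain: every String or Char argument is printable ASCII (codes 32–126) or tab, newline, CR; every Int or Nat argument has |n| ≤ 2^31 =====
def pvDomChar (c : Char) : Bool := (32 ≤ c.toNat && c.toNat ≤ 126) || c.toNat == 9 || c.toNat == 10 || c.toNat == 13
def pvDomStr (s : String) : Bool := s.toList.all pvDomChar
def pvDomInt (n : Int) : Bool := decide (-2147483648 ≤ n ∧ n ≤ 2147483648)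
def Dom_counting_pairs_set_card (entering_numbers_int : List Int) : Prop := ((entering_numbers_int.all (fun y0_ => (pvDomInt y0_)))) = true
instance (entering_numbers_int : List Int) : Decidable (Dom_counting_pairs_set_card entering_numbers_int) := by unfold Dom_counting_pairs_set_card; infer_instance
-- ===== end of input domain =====

-- B replaces A's Counter-and-scan by sort-then-run-length-scan (objective: alternative).

-- ===== PORT A =====
-- the body of A's 'for i in num_dict' loop (Counter lookup num_dict[i] = getD i 0, exact for Counter)
def pvBody (num_dict : PySem.Dict Int Int) (answer : PySem.Dict String Int) (i : Int) : PySem.Dict String Int :=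
  if num_dict.getD i 0 == 2 then answer.modify "Пары" 0 (· + 1)
  else if num_dict.getD i 0 == 3 then answer.modify "Сет" 0 (· + 1)
  else if num_dict.getD i 0 == 4 then answer.modify "Каре" 0 (· + 1)
  else answer

def counting_pairs_set_card (entering_numbers_int : List Int) : List (String × Int) :=
  let answer : PySem.Dict String Int := PySem.Dict.mk [("Пары", 0), ("Сет", 0), ("Каре", 0)]
  let num_dict := PySem.Dict.counter entering_numbers_int
  (num_dict.keys.foldl (pvBody num_dict) answer).items

-- ===== PORT B =====
-- the body of B's 'for y in sorted(...)' loop; state = (p, s, q, run, prev)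
def pvStep (st : Int × Int × Int × Int × Option Int) (y : Int) : Int × Int × Int × Int × Option Int :=
  match st with
  | (p, s, q, run, prev) =>
    if run > 0 && prev == some y then (p, s, q, run + 1, some y)
    else (p + (if run == 2 then 1 else 0), s + (if run == 3 then 1 else 0),
          q + (if run == 4 then 1 else 0), 1, some y)

def counting_pairs_set_card_alt (entering_numbers_int : List Int) : List (String × Int) :=
  match (PySem.List.sorted entering_numbers_int (fun v => v) false).foldl pvStep (0, 0, 0, 0, none) with
  | (p, s, q, run, _) =>
    [("Пары", p + (if run == 2 then 1 else 0)), ("Сет", s + (if run == 3 then 1 else 0)),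
     ("Каре", q + (if run == 4 then 1 else 0))]

-- ===== PRECONDITION & SPEC =====
def Spec_counting_pairs_set_card (entering_numbers_int : List Int) (out : List (String × Int)) : Prop := out = counting_pairs_set_card_alt entering_numbers_int
instance (entering_numbers_int : List Int) (out : List (String × Int)) : Decidable (Spec_counting_pairs_set_card entering_numbers_int out) := by unfold Spec_counting_pairs_set_card; infer_instance

-- ===== CLAIM (what is proved, stated in full; the proofs are below) =====
def Claim_equal_counting_pairs_set_card : Prop := ∀ (entering_numbers_int : List Int), Dom_counting_pairs_set_card entering_numbers_int → Spec_counting_pairs_set_card entering_numbers_int (counting_pairs_set_card entering_numbers_int)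

-- ===== LEMMAS AND PROOFS =====

-- answer["Пары"] += 1 on A's three-key answer dict, and likewise for the other two keys
lemma pvMod1 (a b c : Int) : (PySem.Dict.mk [("Пары", a), ("Сет", b), ("Каре", c)]).modify "Пары" 0 (· + 1) = PySem.Dict.mk [("Пары", a + 1), ("Сет", b), ("Каре", c)] := by
  simp [PySem.Dict.modify, PySem.Dict.insert, PySem.Dict.getD, PySem.Dict.get?_mk_cons]

lemma pvMod2 (a b c : Int) : (PySem.Dict.mk [("Пары", a), ("Сет", b), ("Каре", c)]).modify "Сет" 0 (· + 1) = PySem.Dict.mk [("Пары", a), ("Сет", b + 1), ("Каре", c)] := by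
  simp [PySem.Dict.modify, PySem.Dict.insert, PySem.Dict.getD, PySem.Dict.get?_mk_cons]

lemma pvMod3 (a b c : Int) : (PySem.Dict.mk [("Пары", a), ("Сет", b), ("Каре", c)]).modify "Каре" 0 (· + 1) = PySem.Dict.mk [("Пары", a), ("Сет", b), ("Каре", c + 1)] := by
  simp [PySem.Dict.modify, PySem.Dict.insert, PySem.Dict.getD, PySem.Dict.get?_mk_cons]

-- A's loop adds, to each of the three counters, the number of keys of multiplicity 2 / 3 / 4
lemma pvLoop (nd : PySem.Dict Int Int) (l : List Int) (a b c : Int) :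
    l.foldl (pvBody nd) (PySem.Dict.mk [("Пары", a), ("Сет", b), ("Каре", c)]) =
      PySem.Dict.mk
        [("Пары", a + (l.countP (fun i => nd.getD i 0 == 2) : Int)),
         ("Сет", b + (l.countP (fun i => nd.getD i 0 == 3) : Int)),
         ("Каре", c + (l.countP (fun i => nd.getD i 0 == 4) : Int))] := by
  induction l generalizing a b c with
  | nil => simp
  | cons x t ih =>
      simp only [List.foldl_cons, List.countP_cons, pvBody]
      by_cases h2 : nd.getD x 0 = 2
      · rw [if_pos (by simp [h2]), pvMod1, ih]
        simp [h2]; ring_nf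
      · by_cases h3 : nd.getD x 0 = 3
        · rw [if_neg (by simp [h2]), if_pos (by simp [h3]), pvMod2, ih]
          simp [h3]; ring_nf
        · by_cases h4 : nd.getD x 0 = 4
          · rw [if_neg (by simp [h2]), if_neg (by simp [h3]), if_pos (by simp [h4]), pvMod3, ih]
            simp [h4]; ring_nf
          · rw [if_neg (by simp [h2]), if_neg (by simp [h3]), if_neg (by simp [h4]), ih]
            simp [h2, h3, h4]

-- number of distinct values of multiplicity v
def pvCv (v : Int) (xs : List Int) : Int :=
  ((PySem.Set.ofList xs).countP (fun i => ((xs.count i : Int)) == v) : Int)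

lemma pvCv_nil (v : Int) : pvCv v [] = 0 := rfl

-- dedup commutes with filter
lemma pvOfListFilter (p : Int → Bool) (t : List Int) :
    (PySem.Set.ofList t).filter p = PySem.Set.ofList (t.filter p) := by
  induction t using List.reverseRecOn with
  | nil => rfl
  | append_singleton s a ih =>
      by_cases hp : p a
      · rw [List.filter_append, show List.filter p [a] = [a] by simp [hp],
          PySem.Set.ofList_append_singleton, PySem.Set.ofList_append_singleton, ← ih]
        simp only [PySem.Set.add, PySem.Set.contains, List.contains_eq_mem]
        by_cases hm : a ∈ s
        · have h1 : a ∈ PySem.Set.ofList s := (PySem.Set.mem_ofList s a).mpr hm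
          have h2 : a ∈ List.filter p (PySem.Set.ofList s) := List.mem_filter.mpr ⟨h1, hp⟩
          simp [h1, h2]
        · have h1 : a ∉ PySem.Set.ofList s := fun h => hm ((PySem.Set.mem_ofList s a).mp h)
          have h2 : a ∉ List.filter p (PySem.Set.ofList s) := fun h => h1 (List.mem_of_mem_filter h)
          simp [h1, h2, List.filter_append, hp]
      · rw [List.filter_append, show List.filter p [a] = [] by simp [hp], List.append_nil,
          PySem.Set.ofList_append_singleton, ← ih]
        simp only [PySem.Set.add, PySem.Set.contains, List.contains_eq_mem]
        by_cases hm : a ∈ PySem.Set.ofList s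
        · simp [hm]
        · simp [hm, List.filter_append, hp]

-- peeling one distinct value off the multiplicity profile
lemma pvCv_cons (v y : Int) (t : List Int) :
    pvCv v (y :: t) = (if (((y :: t).count y : Int)) == v then 1 else 0) + pvCv v (t.filter (fun z => !(z == y))) := by
  unfold pvCv
  rw [PySem.Set.ofList_cons, List.countP_cons]
  have hdis : (PySem.Set.ofList t).discard y = PySem.Set.ofList (t.filter (fun z => !(z == y))) := by
    simpa [PySem.Set.discard] using pvOfListFilter (fun z => !(z == y)) t
  rw [hdis]
  have hcong : (PySem.Set.ofList (t.filter (fun z => !(z == y)))).countP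
        (fun i => (((y :: t).count i : Int)) == v)
      = (PySem.Set.ofList (t.filter (fun z => !(z == y)))).countP
        (fun i => (((t.filter (fun z => !(z == y))).count i : Int)) == v) := by
    apply List.countP_congr
    intro i hi
    rw [PySem.Set.mem_ofList, List.mem_filter] at hi
    have hiy : ¬ (i = y) := by simpa using hi.2
    have h1 : List.count i (y :: t) = List.count i t := by simp [Ne.symm hiy]
    rw [h1, List.count_filter (by simpa using hiy)]
  rw [hcong]
  simp [Int.add_comm]

-- the final flush of B's scan
def pvFin (st : Int × Int × Int × Int × Option Int) : Int × Int × Int :=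
  (st.1 + (if st.2.2.2.1 == 2 then 1 else 0), st.2.1 + (if st.2.2.2.1 == 3 then 1 else 0),
   st.2.2.1 + (if st.2.2.2.1 == 4 then 1 else 0))

-- B's scan, mid-run: run ≥ 1 copies of x already seen, everything ahead is ≥ x
lemma pvFoldInv (ys : List Int) (hs : ys.Pairwise (· ≤ ·)) :
    ∀ (x p s q run : Int), 1 ≤ run → (∀ y ∈ ys, x ≤ y) →
    pvFin (ys.foldl pvStep (p, s, q, run, some x)) =
      (p + ((if run + ((ys.count x : Int)) == 2 then 1 else 0) + pvCv 2 (ys.filter (fun z => !(z == x)))),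
       s + ((if run + ((ys.count x : Int)) == 3 then 1 else 0) + pvCv 3 (ys.filter (fun z => !(z == x)))),
       q + ((if run + ((ys.count x : Int)) == 4 then 1 else 0) + pvCv 4 (ys.filter (fun z => !(z == x))))) := by
  induction ys with
  | nil => intro x p s q run h1 _; simp [pvFin, pvCv_nil]
  | cons y t ih =>
      intro x p s q run h1 hle
      have hyt := List.pairwise_cons.mp hs
      by_cases hxy : x = y
      · subst hxy
        have hstep : pvStep (p, s, q, run, some x) x = (p, s, q, run + 1, some x) := by
          simp [pvStep, show run > 0 from h1]
        rw [List.foldl_cons, hstep,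
          ih hyt.2 x p s q (run + 1) (by omega) (fun z hz => le_trans (hle x (by simp)) (hyt.1 z hz))]
        have hc : run + 1 + ((t.count x : Int)) = run + (((x :: t).count x : Int)) := by
          rw [List.count_cons_self]; push_cast; ring
        simp only [hc, List.filter_cons]
        simp
      · have hxy' : x < y := lt_of_le_of_ne (hle y (by simp)) hxy
        have hstep : pvStep (p, s, q, run, some x) y =
            (p + (if run == 2 then 1 else 0), s + (if run == 3 then 1 else 0),
             q + (if run == 4 then 1 else 0), 1, some y) := by
          simp [pvStep, show ¬ (x = y) from hxy]
        have hxt : ∀ z ∈ t, ¬ (z = x) := by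
          intro z hz h
          have := hyt.1 z hz
          omega
        rw [List.foldl_cons, hstep, ih hyt.2 y _ _ _ 1 le_rfl hyt.1]
        have hcx : (y :: t).count x = 0 := by
          rw [List.count_eq_zero]
          intro hmem
          rcases List.mem_cons.mp hmem with h | h
          · exact hxy h
          · exact hxt x h rfl
        have hfx : (y :: t).filter (fun z => !(z == x)) = y :: t := by
          rw [List.filter_cons_of_pos (by simp [Ne.symm hxy])]
          congr 1
          exact List.filter_eq_self.mpr (fun z hz => by simpa using hxt z hz)
        have hCv : ∀ v : Int, pvCv v (y :: t) =
            (if (1 + ((t.count y : Int)) == v) then 1 else 0) + pvCv v (t.filter (fun z => !(z == y))) := by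
          intro v
          rw [pvCv_cons, List.count_cons_self]
          have hc1 : ((t.count y + 1 : Nat) : Int) = 1 + ((t.count y : Int)) := by push_cast; ring
          rw [hc1]
        rw [hcx, hfx]
        simp only [hCv, Int.natCast_zero, add_zero]
        ring_nf

-- B's full scan on a sorted list computes (pvCv 2, pvCv 3, pvCv 4)
lemma pvFoldSorted (ys : List Int) (hs : ys.Pairwise (· ≤ ·)) :
    pvFin (ys.foldl pvStep (0, 0, 0, 0, none)) = (pvCv 2 ys, pvCv 3 ys, pvCv 4 ys) := by
  match ys with
  | [] => simp [pvFin, pvCv_nil]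
  | y :: t =>
      have hyt := List.pairwise_cons.mp hs
      have hstep : pvStep ((0 : Int), (0 : Int), (0 : Int), (0 : Int), (none : Option Int)) y =
          (0, 0, 0, 1, some y) := by simp [pvStep]
      rw [List.foldl_cons, hstep, pvFoldInv t hyt.2 y 0 0 0 1 le_rfl hyt.1]
      have hCv : ∀ v : Int, pvCv v (y :: t) =
          (if (1 + ((t.count y : Int)) == v) then 1 else 0) + pvCv v (t.filter (fun z => !(z == y))) := by
        intro v
        rw [pvCv_cons, List.count_cons_self]
        have hc1 : ((t.count y + 1 : Nat) : Int) = 1 + ((t.count y : Int)) := by push_cast; ring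
        rw [hc1]
      simp only [hCv]
      ring_nf

-- the multiplicity profile is invariant under sorting
lemma pvCvSorted (xs : List Int) (v : Int) :
    pvCv v (PySem.List.sorted xs (fun w => w) false) = pvCv v xs := by
  unfold pvCv
  have hperm : (PySem.List.sorted xs (fun w => w) false).Perm xs := PySem.List.sorted_perm xs _ _
  have hsetperm : (PySem.Set.ofList (PySem.List.sorted xs (fun w => w) false)).Perm (PySem.Set.ofList xs) := by
    apply List.perm_of_nodup_nodup_toFinset_eq (PySem.Set.nodup_ofList _) (PySem.Set.nodup_ofList _)
    ext a
    simp [PySem.Set.mem_ofList, hperm.mem_iff]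
  have hcong : (PySem.Set.ofList (PySem.List.sorted xs (fun w => w) false)).countP
        (fun i => (((PySem.List.sorted xs (fun w => w) false).count i : Int)) == v)
      = (PySem.Set.ofList (PySem.List.sorted xs (fun w => w) false)).countP
        (fun i => ((xs.count i : Int)) == v) := by
    apply List.countP_congr
    intro i _
    rw [hperm.count_eq]
  rw [hcong, List.Perm.countP_eq _ hsetperm]

-- ===== VERDICT (by name: the statement is the Claim_ definition above) =====
theorem counting_pairs_set_card_spec : Claim_equal_counting_pairs_set_card := by
  intro xs _
  show counting_pairs_set_card xs = counting_pairs_set_card_alt xs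
  simp only [counting_pairs_set_card, counting_pairs_set_card_alt]
  rw [pvLoop]
  have hpred : ∀ v : Int, (fun i => (PySem.Dict.counter xs).getD i 0 == v)
      = (fun i => ((xs.count i : Int)) == v) := by
    intro v; funext i; rw [PySem.Dict.getD_counter]
  have hB := pvFoldSorted (PySem.List.sorted xs (fun w => w) false)
    (PySem.List.sorted_pairwise xs (fun w => w))
  rcases hst : (PySem.List.sorted xs (fun w => w) false).foldl pvStep (0, 0, 0, 0, none) with
    ⟨p, s, q, run, prev⟩
  rw [hst] at hB
  have h2 := congrArg Prod.fst hB
  have h3 := congrArg (fun r => r.2.1) hB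
  have h4 := congrArg (fun r => r.2.2) hB
  simp only [pvFin] at h2 h3 h4
  rw [pvCvSorted] at h2 h3 h4
  unfold pvCv at h2 h3 h4
  simp only [PySem.Dict.keys_counter, hpred, ← h2, ← h3, ← h4]
  norm_num
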